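-- pv_equiv track=rewrite | github.com/sanjay-lan/Machine-Learning-based-Frame-shift-mutation-analysis | frame_shift-1/FS-1_first_occ.py | count_TAA_j_followed_by_k
-- ===== SOURCE A (Python) =====
-- def count_TAA_j_followed_by_k(gene_sequence, j, k):
--     first_occ = 0
--     codons_rx = ["ttt", "tct", "tat", "tgt", "ctt", "cct", "cat", "agt", "att", "act", "aat", "agt", "gtt", "gct",
--                  "gat", "ggt"]
--     codons_ry = ["aat", "aac", "aaa", "aag"]
--
--     for i in range(0, len(gene_sequence) - 3, 3):
--         codon = gene_sequence[i:i + 3]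
--         next_codon = gene_sequence[i + 3:i + 6]
--
--         if codon == j and next_codon == k:
--             if j in codons_rx and k in codons_ry:
--                 if first_occ == 0:
--                     first_occ = (i // 3) + 1
--     return first_occ
-- ===== SOURCE B (Python) =====
-- CODONS_RX = {"ttt", "tct", "tat", "tgt", "ctt", "cct", "cat", "agt", "att", "act",
--              "aat", "gtt", "gct", "gat", "ggt"}
-- CODONS_RY = {"aat", "aac", "aaa", "aag"}
--
--
-- def count_TAA_j_followed_by_k(gene_sequence, j, k):
--     if j not in CODONS_RX or k not in CODONS_RY:
--         return 0
--     pattern = j + k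
--     p = gene_sequence.find(pattern)
--     while p != -1:
--         if p % 3 == 0:
--             return p // 3 + 1
--         p = gene_sequence.find(pattern, p + 1)
--     return 0
-- ===== Notes on version B (the rewrite author's own statement) =====
-- stated objective: idiomatic
-- what changed: B first rejects j/k not in the codon sets, then uses built-in substring search (str.find of the 6-char concatenation j+k, restarted past each unaligned occurrence, returning at the first index divisible by 3) instead of A's codon-by-codon slicing loop that scans the whole sequence and keeps the first hit in a flag.
import Mathlib
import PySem

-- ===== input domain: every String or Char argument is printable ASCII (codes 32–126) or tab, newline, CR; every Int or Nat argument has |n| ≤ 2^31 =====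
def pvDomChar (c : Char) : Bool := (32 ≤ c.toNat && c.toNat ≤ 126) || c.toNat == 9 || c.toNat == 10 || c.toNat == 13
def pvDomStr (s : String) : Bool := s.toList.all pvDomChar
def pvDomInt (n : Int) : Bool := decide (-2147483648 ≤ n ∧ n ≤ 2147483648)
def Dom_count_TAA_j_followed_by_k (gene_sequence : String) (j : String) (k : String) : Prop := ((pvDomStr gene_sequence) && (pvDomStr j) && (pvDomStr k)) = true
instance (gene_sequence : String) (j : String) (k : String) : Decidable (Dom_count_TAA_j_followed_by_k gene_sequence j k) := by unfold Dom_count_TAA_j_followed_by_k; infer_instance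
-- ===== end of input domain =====

-- B: guard on the codon sets first, then built-in substring search for j+k with a step-3
-- alignment filter, instead of A's codon-by-codon slicing loop (idiomatic; measurably faster by constant factor).

-- ===== PORT A =====
def count_TAA_j_followed_by_k (gene_sequence : String) (j : String) (k : String) : Int :=
  let codons_rx : List String := ["ttt", "tct", "tat", "tgt", "ctt", "cct", "cat", "agt", "att", "act",
                                  "aat", "agt", "gtt", "gct", "gat", "ggt"]
  let codons_ry : List String := ["aat", "aac", "aaa", "aag"]
  (PySem.List.pyRange 0 (PySem.Str.len gene_sequence - 3) 3).foldl
    (fun first_occ i =>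
      let codon := PySem.Str.slice gene_sequence (some i) (some (i + 3))
      let next_codon := PySem.Str.slice gene_sequence (some (i + 3)) (some (i + 6))
      if codon = j ∧ next_codon = k then
        if j ∈ codons_rx ∧ k ∈ codons_ry then
          if first_occ = 0 then PySem.Int.floordiv i 3 + 1 else first_occ
        else first_occ
      else first_occ) 0

-- ===== PORT B =====
def pvCodonsRx : PySem.Set String :=
  PySem.Set.ofList ["ttt", "tct", "tat", "tgt", "ctt", "cct", "cat", "agt", "att", "act",
                    "aat", "gtt", "gct", "gat", "ggt"]

def pvCodonsRy : PySem.Set String := PySem.Set.ofList ["aat", "aac", "aaa", "aag"]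

/-- The `while p != -1` loop of Source B; `fuel` only makes the recursion structural
(it is always sufficient: each restart strictly increases the index). -/
def pvFindAligned (s pat : List Char) (p : Int) (fuel : Nat) : Int :=
  match fuel with
  | 0 => 0
  | f + 1 =>
    if p = -1 then 0
    else if PySem.Int.mod p 3 = 0 then PySem.Int.floordiv p 3 + 1
    else pvFindAligned s pat (PySem.Chars.findFrom s pat (p + 1)) f

def count_TAA_j_followed_by_k_alt (gene_sequence : String) (j : String) (k : String) : Int :=
  if j ∉ pvCodonsRx ∨ k ∉ pvCodonsRy then 0
  else
    let s := gene_sequence.toList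
    let pattern := j.toList ++ k.toList
    pvFindAligned s pattern (PySem.Chars.find s pattern) (s.length + 2)

-- ===== PRECONDITION & SPEC =====
def Spec_count_TAA_j_followed_by_k (gene_sequence : String) (j : String) (k : String) (out : Int) : Prop := out = count_TAA_j_followed_by_k_alt gene_sequence j k
instance (gene_sequence : String) (j : String) (k : String) (out : Int) : Decidable (Spec_count_TAA_j_followed_by_k gene_sequence j k out) := by unfold Spec_count_TAA_j_followed_by_k; infer_instance

-- ===== CLAIM (what is proved, stated in full; the proofs are below) =====
def Claim_equal_count_TAA_j_followed_by_k : Prop := ∀ (gene_sequence : String) (j : String) (k : String), Dom_count_TAA_j_followed_by_k gene_sequence j k → Spec_count_TAA_j_followed_by_k gene_sequence j k (count_TAA_j_followed_by_k gene_sequence j k)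

-- ===== LEMMAS AND PROOFS =====

def pvRxL : List String := ["ttt", "tct", "tat", "tgt", "ctt", "cct", "cat", "agt", "att", "act",
                            "aat", "agt", "gtt", "gct", "gat", "ggt"]
def pvRyL : List String := ["aat", "aac", "aaa", "aag"]

/-- A's loop body, named for the proofs. -/
def pvStep (g j k : String) : Int → Int → Int := fun first_occ i =>
  let codon := PySem.Str.slice g (some i) (some (i + 3))
  let next_codon := PySem.Str.slice g (some (i + 3)) (some (i + 6))
  if codon = j ∧ next_codon = k then
    if j ∈ pvRxL ∧ k ∈ pvRyL then
      if first_occ = 0 then PySem.Int.floordiv i 3 + 1 else first_occ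
    else first_occ
  else first_occ

lemma pvA_eq (g j k : String) :
    count_TAA_j_followed_by_k g j k =
      (PySem.List.pyRange 0 (PySem.Str.len g - 3) 3).foldl (pvStep g j k) 0 := rfl

lemma pvGuard_iff (j k : String) :
    (j ∈ pvRxL ∧ k ∈ pvRyL) ↔ (j ∈ pvCodonsRx ∧ k ∈ pvCodonsRy) := by
  have h1 : j ∈ pvRxL ↔ j ∈ pvCodonsRx := by
    simp [pvRxL, pvCodonsRx, PySem.Set.mem_ofList]
    tauto
  have h2 : k ∈ pvRyL ↔ k ∈ pvCodonsRy := by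
    simp [pvRyL, pvCodonsRy, PySem.Set.mem_ofList]
  rw [h1, h2]

lemma pvLenRx (j : String) (h : j ∈ pvRxL) : j.toList.length = 3 := by
  unfold pvRxL at h
  fin_cases h <;> decide

lemma pvLenRy (k : String) (h : k ∈ pvRyL) : k.toList.length = 3 := by
  unfold pvRyL at h
  fin_cases h <;> decide

lemma pvStep_keep (g j k : String) (acc i : Int) (h : acc ≠ 0) : pvStep g j k acc i = acc := by
  unfold pvStep
  split_ifs <;> simp_all

lemma pvFold_keep' (g j k : String) (f : Nat → Int) (l : List Nat) (acc : Int) (h : acc ≠ 0) :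
    l.foldl (fun (a : Int) (t : Nat) => pvStep g j k a (f t)) acc = acc := by
  induction l generalizing acc with
  | nil => rfl
  | cons x xs ih => rw [List.foldl_cons, pvStep_keep g j k acc (f x) h]; exact ih acc h

lemma pvFold_noguard (g j k : String) (hm : ¬ (j ∈ pvRxL ∧ k ∈ pvRyL)) (l : List Int) (acc : Int) :
    l.foldl (pvStep g j k) acc = acc := by
  induction l generalizing acc with
  | nil => rfl
  | cons x xs ih =>
    rw [List.foldl_cons]
    have : pvStep g j k acc x = acc := by
      unfold pvStep; simp [hm]
    rw [this]; exact ih acc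

/-- the two 3-char slice comparisons are exactly "j+k occurs (as chars) at this offset". -/
lemma pvTake_iff {J K y : List Char} (hj : J.length = 3) (hk : K.length = 3) :
    (y.take 3 = J ∧ (y.drop 3).take 3 = K) ↔ (J ++ K) <+: y := by
  constructor
  · rintro ⟨h1, h2⟩
    rw [List.prefix_iff_eq_take]
    simp [hj, hk]
    rw [show (6:Nat) = 3 + 3 from rfl, List.take_add, h1, h2]
  · intro h
    have hl := List.prefix_iff_eq_take.mp h
    simp [hj, hk] at hl
    constructor
    · have ht := congrArg (List.take 3) hl
      rw [List.take_take] at ht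
      have hJ : List.take 3 (J ++ K) = J := by rw [← hj, List.take_left]
      rw [hJ] at ht
      simpa using ht.symm
    · have hd := congrArg (List.drop 3) hl
      rw [List.drop_take] at hd
      have hK : List.drop 3 (J ++ K) = K := by rw [← hj, List.drop_left]
      rw [hK] at hd
      simpa using hd.symm

lemma pvCond_iff (g j k : String) (hj : j.toList.length = 3) (hk : k.toList.length = 3) (t : Nat) :
    (PySem.Str.slice g (some (0 + 3 * (t : Int))) (some (0 + 3 * (t : Int) + 3)) = j ∧
     PySem.Str.slice g (some (0 + 3 * (t : Int) + 3)) (some (0 + 3 * (t : Int) + 6)) = k)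
    ↔ (j.toList ++ k.toList) <+: g.toList.drop (3 * t) := by
  have e1 : (0 + 3 * (t : Int)) = ((3 * t : Nat) : Int) := by push_cast; ring
  have e2 : (0 + 3 * (t : Int) + 3) = ((3 * t + 3 : Nat) : Int) := by push_cast; ring
  have e3 : (0 + 3 * (t : Int) + 6) = ((3 * t + 6 : Nat) : Int) := by push_cast; ring
  have c1 : (PySem.Str.slice g (some (0 + 3 * (t : Int))) (some (0 + 3 * (t : Int) + 3)) = j)
      ↔ (g.toList.drop (3 * t)).take 3 = j.toList := by
    rw [← String.toList_inj, PySem.Str.toList_slice, PySem.Chars.slice_eq_listSlice, e1,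
      show ((3 * t : Nat) : Int) + 3 = ((3 * t : Nat) : Int) + ((3 : Nat) : Int) from rfl,
      PySem.List.slice_natCast_add]
  have c2 : (PySem.Str.slice g (some (0 + 3 * (t : Int) + 3)) (some (0 + 3 * (t : Int) + 6)) = k)
      ↔ (g.toList.drop (3 * t + 3)).take 3 = k.toList := by
    rw [← String.toList_inj, PySem.Str.toList_slice, PySem.Chars.slice_eq_listSlice, e2, e3,
      show ((3 * t + 6 : Nat) : Int) = ((3 * t + 3 : Nat) : Int) + ((3 : Nat) : Int) by push_cast; ring,
      PySem.List.slice_natCast_add]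
  rw [c1, c2, ← pvTake_iff hj hk, List.drop_drop]

lemma pvFold_skip (g j k : String) (hj : j.toList.length = 3) (hk : k.toList.length = 3)
    (l : List Nat) (acc : Int)
    (h : ∀ t ∈ l, ¬ (j.toList ++ k.toList) <+: g.toList.drop (3 * t)) :
    l.foldl (fun (a : Int) (t : Nat) => pvStep g j k a (0 + 3 * (t : Int))) acc = acc := by
  induction l generalizing acc with
  | nil => rfl
  | cons x xs ih =>
    rw [List.foldl_cons]
    have hstep : pvStep g j k acc (0 + 3 * (x : Int)) = acc := by
      unfold pvStep
      rw [if_neg]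
      intro hc
      exact h x (List.mem_cons_self ..) ((pvCond_iff g j k hj hk x).mp hc)
    rw [hstep]
    exact ih acc (fun t ht => h t (List.mem_cons_of_mem _ ht))

lemma pvHit_le {s pat : List Char} {i : Nat} (hp : pat.length = 6) (h : pat <+: s.drop i) :
    i + 6 ≤ s.length := by
  have := h.length_le
  simp [hp] at this
  omega

lemma pvA_guardfalse (g j k : String) (hm : ¬ (j ∈ pvRxL ∧ k ∈ pvRyL)) :
    count_TAA_j_followed_by_k g j k = 0 := by
  rw [pvA_eq]
  exact pvFold_noguard g j k hm _ 0

lemma pvA_none (g j k : String) (hj : j.toList.length = 3) (hk : k.toList.length = 3)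
    (h : ¬ ∃ i : Nat, i % 3 = 0 ∧ (j.toList ++ k.toList) <+: g.toList.drop i) :
    count_TAA_j_followed_by_k g j k = 0 := by
  rw [pvA_eq, PySem.Str.len_eq,
    PySem.List.pyRange_of_pos 0 _ (by norm_num : (0:Int) < 3), List.foldl_map]
  exact pvFold_skip g j k hj hk _ 0 (fun t _ hpref => h ⟨3 * t, by omega, hpref⟩)

lemma pvA_some (g j k : String) (hm : j ∈ pvRxL ∧ k ∈ pvRyL)
    (hj : j.toList.length = 3) (hk : k.toList.length = 3)
    (h : ∃ i : Nat, i % 3 = 0 ∧ (j.toList ++ k.toList) <+: g.toList.drop i) :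
    count_TAA_j_followed_by_k g j k = ((Nat.find h / 3 : Nat) : Int) + 1 := by
  have h0 : Nat.find h % 3 = 0 := (Nat.find_spec h).1
  have hpre := (Nat.find_spec h).2
  have hmin : ∀ m < Nat.find h, ¬ (m % 3 = 0 ∧ (j.toList ++ k.toList) <+: g.toList.drop m) :=
    fun m hm => Nat.find_min h hm
  obtain ⟨t0, ht0⟩ : ∃ t, Nat.find h = 3 * t := ⟨Nat.find h / 3, by omega⟩
  rw [ht0] at hpre hmin
  have hle : 3 * t0 + 6 ≤ g.toList.length := pvHit_le (by simp [hj, hk]) hpre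
  rw [pvA_eq, PySem.Str.len_eq,
    PySem.List.pyRange_of_pos 0 _ (by norm_num : (0:Int) < 3), List.foldl_map,
    if_pos (by omega : (0:Int) < (g.toList.length : Int) - 3)]
  set M := (((g.toList.length : Int) - 3 - 0 + 3 - 1) / 3).toNat with hM
  have htM : t0 < M := by omega
  have hsplit : List.range M = List.range t0 ++ List.map (fun x => t0 + x) (List.range (M - t0)) := by
    rw [← List.range_add]; congr 1; omega
  rw [hsplit, List.foldl_append,
    pvFold_skip g j k hj hk _ 0
      (fun t ht hpref => hmin (3 * t)
        (by have := List.mem_range.mp ht; omega) ⟨by omega, hpref⟩),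
    show M - t0 = (M - t0 - 1) + 1 by omega,
    List.range_succ_eq_map, List.map_cons, List.foldl_cons, Nat.add_zero]
  have hstep : pvStep g j k 0 (0 + 3 * (t0 : Int)) = (t0 : Int) + 1 := by
    unfold pvStep
    rw [if_pos ((pvCond_iff g j k hj hk t0).mpr hpre), if_pos hm, if_pos rfl,
      show (0 + 3 * (t0 : Int)) = ((3 * t0 : Nat) : Int) by push_cast; ring,
      show PySem.Int.floordiv ((3 * t0 : Nat) : Int) 3 = (((3 * t0) / 3 : Nat) : Int) from
        PySem.Int.floordiv_natCast (3 * t0) 3,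
      Nat.mul_div_cancel_left t0 (by norm_num : 0 < 3)]
  rw [hstep, pvFold_keep' g j k _ _ _ (by omega), ht0]
  congr 2
  omega

lemma pvLoop_none (s pat : List Char) (hp : pat.length = 6)
    (hno : ∀ i : Nat, ¬ (i % 3 = 0 ∧ pat <+: s.drop i)) :
    ∀ (fuel start : Nat), start ≤ s.length →
      pvFindAligned s pat (PySem.Chars.findFrom s pat (start : Int)) fuel = 0 := by
  intro fuel
  induction fuel with
  | zero => intro start hs; rfl
  | succ f ih =>
    intro start hs
    simp only [pvFindAligned]
    by_cases hq : PySem.Chars.findFrom s pat (start : Int) = -1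
    · rw [if_pos hq]
    · rw [if_neg hq]
      obtain ⟨hge, hpre, hmin⟩ := PySem.Chars.findFrom_natCast_spec s pat start hs hq
      set q := PySem.Chars.findFrom s pat (start : Int) with hqdef
      have hq0 : (0 : Int) ≤ q := le_trans (by exact_mod_cast Nat.zero_le start) hge
      have hqe : q = (q.toNat : Int) := (Int.toNat_of_nonneg hq0).symm
      have hqn : q.toNat + 6 ≤ s.length := pvHit_le hp hpre
      by_cases hm3 : PySem.Int.mod q 3 = 0
      · exfalso
        apply hno q.toNat
        refine ⟨?_, hpre⟩
        rw [hqe,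
          show PySem.Int.mod ((q.toNat : Nat) : Int) 3 = ((q.toNat % 3 : Nat) : Int) from
            PySem.Int.mod_natCast q.toNat 3] at hm3
        exact_mod_cast hm3
      · rw [if_neg hm3, show q + 1 = ((q.toNat + 1 : Nat) : Int) by omega]
        exact ih (q.toNat + 1) (by omega)

lemma pvLoop_some (s pat : List Char) (hp : pat.length = 6)
    (h : ∃ i : Nat, i % 3 = 0 ∧ pat <+: s.drop i) :
    ∀ (fuel start : Nat), start ≤ s.length → s.length + 1 ≤ fuel + start →
      (∀ i < start, ¬ (i % 3 = 0 ∧ pat <+: s.drop i)) →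
      pvFindAligned s pat (PySem.Chars.findFrom s pat (start : Int)) fuel
        = ((Nat.find h / 3 : Nat) : Int) + 1 := by
  intro fuel
  induction fuel with
  | zero => intro start hs hf hinv; exact absurd hf (by omega)
  | succ f ih =>
    intro start hs hf hinv
    simp only [pvFindAligned]
    by_cases hq : PySem.Chars.findFrom s pat (start : Int) = -1
    · exfalso
      have hno := (PySem.Chars.findFrom_natCast_eq_neg_one_iff s pat start hs).mp hq
      have hfi := Nat.find_spec h
      have hge : start ≤ Nat.find h := by
        by_contra hlt
        exact hinv (Nat.find h) (by omega) hfi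
      apply hno
      refine List.infix_iff_prefix_suffix.mpr ⟨List.drop (Nat.find h) s, hfi.2, ?_⟩
      rw [show Nat.find h = start + (Nat.find h - start) by omega, ← List.drop_drop]
      exact List.drop_suffix _ _
    · rw [if_neg hq]
      obtain ⟨hge, hpre, hmin⟩ := PySem.Chars.findFrom_natCast_spec s pat start hs hq
      set q := PySem.Chars.findFrom s pat (start : Int) with hqdef
      have hq0 : (0 : Int) ≤ q := le_trans (by exact_mod_cast Nat.zero_le start) hge
      have hqe : q = (q.toNat : Int) := (Int.toNat_of_nonneg hq0).symm
      have hqn : q.toNat + 6 ≤ s.length := pvHit_le hp hpre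
      have hges : start ≤ q.toNat := by omega
      by_cases hm3 : PySem.Int.mod q 3 = 0
      · rw [if_pos hm3]
        have hmod : q.toNat % 3 = 0 := by
          rw [hqe,
            show PySem.Int.mod ((q.toNat : Nat) : Int) 3 = ((q.toNat % 3 : Nat) : Int) from
              PySem.Int.mod_natCast q.toNat 3] at hm3
          exact_mod_cast hm3
        have hfind : Nat.find h = q.toNat := by
          rw [Nat.find_eq_iff h]
          refine ⟨⟨hmod, hpre⟩, fun m hm hc => ?_⟩
          rcases Nat.lt_or_ge m start with h' | h'
          · exact hinv m h' hc
          · exact hmin m h' hm hc.2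
        rw [hqe,
          show PySem.Int.floordiv ((q.toNat : Nat) : Int) 3 = ((q.toNat / 3 : Nat) : Int) from
            PySem.Int.floordiv_natCast q.toNat 3, hfind]
      · rw [if_neg hm3, show q + 1 = ((q.toNat + 1 : Nat) : Int) by omega]
        refine ih (q.toNat + 1) (by omega) (by omega) (fun i hi hc => ?_)
        rcases Nat.lt_or_ge i start with h' | h'
        · exact hinv i h' hc
        · rcases Nat.lt_or_ge i q.toNat with h'' | h''
          · exact hmin i h' h'' hc.2
          · have hiq : i = q.toNat := by omega
            apply hm3
            rw [hqe,
              show PySem.Int.mod ((q.toNat : Nat) : Int) 3 = ((q.toNat % 3 : Nat) : Int) from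
                PySem.Int.mod_natCast q.toNat 3]
            exact_mod_cast hiq ▸ hc.1

-- ===== VERDICT (by name: the statement is the Claim_ definition above) =====
theorem count_TAA_j_followed_by_k_spec : Claim_equal_count_TAA_j_followed_by_k := by
  intro g j k _
  unfold Spec_count_TAA_j_followed_by_k count_TAA_j_followed_by_k_alt
  by_cases hm : j ∈ pvRxL ∧ k ∈ pvRyL
  · have hmem := (pvGuard_iff j k).mp hm
    have hj := pvLenRx j hm.1
    have hk := pvLenRy k hm.2
    rw [if_neg (by rintro (hc | hc); exacts [hc hmem.1, hc hmem.2])]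
    by_cases hex : ∃ i : Nat, i % 3 = 0 ∧ (j.toList ++ k.toList) <+: g.toList.drop i
    · have hloop := pvLoop_some g.toList (j.toList ++ k.toList) (by simp [hj, hk]) hex
        (g.toList.length + 2) 0 (Nat.zero_le _) (by omega)
        (fun i hi => absurd hi (Nat.not_lt_zero i))
      rw [Nat.cast_zero, PySem.Chars.findFrom_zero] at hloop
      rw [pvA_some g j k hm hj hk hex]
      exact hloop.symm
    · have hloop := pvLoop_none g.toList (j.toList ++ k.toList) (by simp [hj, hk])
        (fun i hc => hex ⟨i, hc⟩) (g.toList.length + 2) 0 (Nat.zero_le _)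
      rw [Nat.cast_zero, PySem.Chars.findFrom_zero] at hloop
      rw [pvA_none g j k hj hk hex]
      exact hloop.symm
  · have hmem : ¬ (j ∈ pvCodonsRx ∧ k ∈ pvCodonsRy) := fun hc => hm ((pvGuard_iff j k).mpr hc)
    rw [if_pos (by tauto)]
    exact pvA_guardfalse g j k hm
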